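-- pv_equiv track=rewrite | github.com/joemcboe/GUWlib | python/guwlib/functions_utility/console_output.py | split_string_with_whitespace
-- ===== SOURCE A (Python) =====
-- def split_string_with_whitespace(text, line_length):
--     """
--     Split a given text into lines with a specified maximum line length.
--
--    :param str text: The input text to be split into lines.
--    :param int line_length: The maximum length (in characters) of each line.
--
--    :return: A list of strings representing lines after splitting the input text.
--    :rtype: list
--     """
--     lines = []
--     current_line = ""
--     remaining_line_length = line_length
--
--     for char in text:
--         if char == '\n':
--             lines.append(current_line)
--             current_line = ""
--             remaining_line_length = line_length
--         elif char == '\t':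
--             tab_spaces = 4  # You can adjust this to your preferred tab size
--             if remaining_line_length >= tab_spaces:
--                 current_line += ' ' * tab_spaces
--                 remaining_line_length -= tab_spaces
--             else:
--                 lines.append(current_line)
--                 current_line = ' ' * tab_spaces
--                 remaining_line_length = line_length - tab_spaces
--         else:
--             current_line += char
--             remaining_line_length -= 1
--
--             if remaining_line_length == 0:
--                 lines.append(current_line)
--                 current_line = ""
--                 remaining_line_length = line_length
--
--     if current_line:
--         lines.append(current_line)
--
--     return lines
-- ===== SOURCE B (Python) =====
-- def _chunk(out, cur, rem, p, line_length):
--     """Emit hard-wrap chunks of a tab-free, newline-free piece p by slicing."""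
--     if 0 < rem <= len(p):
--         out.append(cur + p[:rem])
--         p = p[rem:]
--         while line_length > 0 and len(p) >= line_length:
--             out.append(p[:line_length])
--             p = p[line_length:]
--         cur, rem = p, line_length - len(p)
--     else:
--         cur += p
--         rem -= len(p)
--     return out, cur, rem
--
--
-- def _wrap_segment(seg, line_length):
--     """Wrap one newline-free segment; tabs split it into pieces, pieces are sliced."""
--     pieces = seg.split('\t')
--     out, cur, rem = _chunk([], "", line_length, pieces[0], line_length)
--     for p in pieces[1:]:
--         if rem >= 4:
--             cur += '    '
--             rem -= 4
--         else:
--             out.append(cur)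
--             cur = '    '
--             rem = line_length - 4
--         out, cur, rem = _chunk(out, cur, rem, p, line_length)
--     return out, cur
--
--
-- def split_string_with_whitespace(text, line_length):
--     segments = text.split('\n')
--     out = []
--     for seg in segments[:-1]:
--         lines, cur = _wrap_segment(seg, line_length)
--         out += lines
--         out.append(cur)
--     lines, cur = _wrap_segment(segments[-1], line_length)
--     out += lines
--     if cur:
--         out.append(cur)
--     return out
-- ===== Notes on version B (the rewrite author's own statement) =====
-- stated objective: faster
-- what changed: A is one monolithic per-character state machine over the whole text; B splits the text on '\n', splits each segment on '\t', and emits whole wrapped lines by slicing each tab-free piece (cur+p[:rem], then slices of length line_length), so the per-character Python loop disappears.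
import Mathlib
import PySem

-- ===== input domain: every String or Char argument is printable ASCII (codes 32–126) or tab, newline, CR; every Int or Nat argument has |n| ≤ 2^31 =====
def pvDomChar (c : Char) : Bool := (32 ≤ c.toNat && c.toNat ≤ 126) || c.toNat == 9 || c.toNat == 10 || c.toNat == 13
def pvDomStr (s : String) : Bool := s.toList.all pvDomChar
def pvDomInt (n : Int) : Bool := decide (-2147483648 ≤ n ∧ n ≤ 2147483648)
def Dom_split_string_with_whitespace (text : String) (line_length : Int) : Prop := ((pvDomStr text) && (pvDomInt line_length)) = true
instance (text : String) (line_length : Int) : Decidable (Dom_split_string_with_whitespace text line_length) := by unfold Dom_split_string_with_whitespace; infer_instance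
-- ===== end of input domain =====

-- B replaces A's per-character state machine by splitting on '\n' and '\t' and emitting
-- whole wrapped lines by slicing the tab-free pieces; same return value, measurably faster in Python.

-- ===== PORT A =====
-- A's per-character state machine: state = (lines, current_line as List Char, remaining_line_length)
def pvStepA (line_length : Int) (st : List String × List Char × Int) (c : Char) :
    List String × List Char × Int :=
  if c = '\n' then
    (st.1 ++ [String.ofList st.2.1], [], line_length)
  else if c = '\t' then
    if 4 ≤ st.2.2 then (st.1, st.2.1 ++ [' ', ' ', ' ', ' '], st.2.2 - 4)
    else (st.1 ++ [String.ofList st.2.1], [' ', ' ', ' ', ' '], line_length - 4)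
  else
    if st.2.2 - 1 = 0 then (st.1 ++ [String.ofList (st.2.1 ++ [c])], [], line_length)
    else (st.1, st.2.1 ++ [c], st.2.2 - 1)

def split_string_with_whitespace (text : String) (line_length : Int) : List String :=
  let st := text.toList.foldl (pvStepA line_length) ([], [], line_length)
  if st.2.1 ≠ [] then st.1 ++ [String.ofList st.2.1] else st.1

-- ===== PORT B =====
-- Source B's _chunk while loop: emit slices of length L while the piece is long enough
def pvWhileB (L : Int) (p : List Char) : List String × List Char :=
  if _h : 0 < L ∧ L ≤ (p.length : Int) then
    let rest := pvWhileB L (p.drop L.toNat)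
    (String.ofList (p.take L.toNat) :: rest.1, rest.2)
  else ([], p)
termination_by p.length
decreasing_by simp only [List.length_drop]; omega

-- Source B's _chunk: returns (new lines, cur, rem)
def pvPieceB (L : Int) (cur : List Char) (rem : Int) (p : List Char) :
    List String × List Char × Int :=
  if 0 < rem ∧ rem ≤ (p.length : Int) then
    let w := pvWhileB L (p.drop rem.toNat)
    (String.ofList (cur ++ p.take rem.toNat) :: w.1, w.2, L - (w.2.length : Int))
  else ([], cur ++ p, rem - p.length)

-- the tab handling before each piece after the first
def pvTabB (L : Int) (cur : List Char) (rem : Int) : List String × List Char × Int :=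
  if 4 ≤ rem then ([], cur ++ [' ', ' ', ' ', ' '], rem - 4)
  else ([String.ofList cur], [' ', ' ', ' ', ' '], L - 4)

-- loop body of _wrap_segment's `for p in pieces[1:]`
def pvSegF (L : Int) (st : List String × List Char × Int) (p : List Char) :
    List String × List Char × Int :=
  let t := pvTabB L st.2.1 st.2.2
  let q := pvPieceB L t.2.1 t.2.2 p
  (st.1 ++ t.1 ++ q.1, q.2)

-- _wrap_segment on the tab-separated pieces: first piece plain, the rest behind a tab
def pvSegB (L : Int) (pieces : List (List Char)) (cur : List Char) (rem : Int) :
    List String × List Char × Int :=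
  match pieces with
  | [] => ([], cur, rem)      -- unreachable: split always yields ≥ 1 piece
  | p :: ps => ps.foldl (pvSegF L) (pvPieceB L cur rem p)

def pvWrapSeg (seg : List Char) (L : Int) : List String × List Char :=
  let st := pvSegB L (PySem.Chars.splitOn seg ['\t']) [] L
  (st.1, st.2.1)

def split_string_with_whitespace_alt (text : String) (line_length : Int) : List String :=
  let segments := PySem.Chars.splitOn text.toList ['\n']   -- text.split('\n')
  let out := segments.dropLast.foldl (fun acc seg =>       -- for seg in segments[:-1]
    acc ++ ((pvWrapSeg seg line_length).1 ++ [String.ofList (pvWrapSeg seg line_length).2])) []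
  let w := pvWrapSeg (segments.getLast?.getD []) line_length  -- segments[-1] (never empty)
  if w.2 ≠ [] then out ++ w.1 ++ [String.ofList w.2] else out ++ w.1

-- ===== PRECONDITION & SPEC =====
def Spec_split_string_with_whitespace (text : String) (line_length : Int) (out : List String) : Prop := out = split_string_with_whitespace_alt text line_length
instance (text : String) (line_length : Int) (out : List String) : Decidable (Spec_split_string_with_whitespace text line_length out) := by unfold Spec_split_string_with_whitespace; infer_instance

-- ===== CLAIM (what is proved, stated in full; the proofs are below) =====
def Claim_equal_split_string_with_whitespace : Prop := ∀ (text : String) (line_length : Int), Dom_split_string_with_whitespace text line_length → Spec_split_string_with_whitespace text line_length (split_string_with_whitespace text line_length)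

-- ===== LEMMAS AND PROOFS =====

-- simple recursive specification of s.split(sep) for a one-character separator
def pvSplit1 (sep : Char) : List Char → List (List Char)
  | [] => [[]]
  | c :: cs => if c = sep then [] :: pvSplit1 sep cs else (pvSplit1 sep cs).modifyHead (c :: ·)

theorem pvSplit1_ne_nil (sep : Char) (l : List Char) : pvSplit1 sep l ≠ [] := by
  induction l with
  | nil => simp [pvSplit1]
  | cons c cs ih =>
    simp only [pvSplit1]
    split_ifs
    · simp
    · cases h : pvSplit1 sep cs with
      | nil => exact absurd h ih
      | cons s ss => simp [List.modifyHead]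

theorem pv_go_spec (sep : Char) : ∀ (fuel : Nat) (l cur : List Char) (acc : List (List Char)),
    l.length < fuel →
    PySem.Chars.splitOn.go [sep] fuel l cur acc
      = acc.reverse ++ (pvSplit1 sep l).modifyHead (cur.reverse ++ ·) := by
  intro fuel
  induction fuel with
  | zero => intro l cur acc h; omega
  | succ f ih =>
    intro l cur acc h
    cases l with
    | nil =>
      rw [PySem.Chars.splitOn.go]
      · simp [pvSplit1]
      · omega
    | cons c rest =>
      rw [PySem.Chars.splitOn.go]
      by_cases hc : c = sep
      · subst hc
        simp only [List.isPrefixOf, BEq.rfl, Bool.true_and, if_pos]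
        rw [show List.drop [c].length (c :: rest) = rest from rfl]
        rw [ih rest [] (cur.reverse :: acc) (by simpa using Nat.lt_of_succ_lt_succ h)]
        cases hs : pvSplit1 c rest with
        | nil => exact absurd hs (pvSplit1_ne_nil c rest)
        | cons s ss => simp [pvSplit1, List.modifyHead, hs]
      · have hpre : ([sep].isPrefixOf (c :: rest)) = false := by
          simp [List.isPrefixOf]; exact fun habs => (hc habs.symm).elim
        rw [hpre]
        simp only [Bool.false_eq_true, if_false]
        rw [ih rest (c :: cur) acc (by simpa using Nat.lt_of_succ_lt_succ h)]
        simp only [pvSplit1, hc, List.reverse_cons, if_false]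
        congr 1
        cases hs : pvSplit1 sep rest with
        | nil => exact absurd hs (pvSplit1_ne_nil sep rest)
        | cons s ss => simp [List.modifyHead]

theorem pv_splitOn_eq (sep : Char) (l : List Char) :
    PySem.Chars.splitOn l [sep] = pvSplit1 sep l := by
  have := pv_go_spec sep (l.length + 1) l [] [] (by omega)
  rw [PySem.Chars.splitOn, this]
  cases h : pvSplit1 sep l with
  | nil => exact absurd h (pvSplit1_ne_nil sep l)
  | cons s ss => simp [List.modifyHead]

-- _chunk starting fresh (cur = "", rem = L) is exactly the while loop
theorem pv_piece_whole (L : Int) (p : List Char) :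
    pvPieceB L [] L p = ((pvWhileB L p).1, (pvWhileB L p).2, L - ((pvWhileB L p).2.length : Int)) := by
  rw [pvWhileB]
  unfold pvPieceB
  split_ifs with h
  · simp
  · simp

-- _chunk satisfies A's per-character recurrence
theorem pv_piece_cons (L : Int) (cur : List Char) (rem : Int) (c : Char) (p : List Char) :
    pvPieceB L cur rem (c :: p) =
      if rem - 1 = 0 then
        (String.ofList (cur ++ [c]) :: (pvPieceB L [] L p).1, (pvPieceB L [] L p).2)
      else pvPieceB L (cur ++ [c]) (rem - 1) p := by
  by_cases hr : rem = 1
  · subst hr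
    rw [if_pos (by norm_num), pv_piece_whole]
    unfold pvPieceB
    rw [if_pos ⟨one_pos, by simp only [List.length_cons]; push_cast; omega⟩]
    simp
  · rw [if_neg (by omega)]
    unfold pvPieceB
    by_cases h2 : 0 < rem ∧ rem ≤ (p.length : Int) + 1
    · have hrem2 : 2 ≤ rem := by omega
      have hk : rem.toNat = (rem - 1).toNat + 1 := by omega
      rw [if_pos (show (0:Int) < rem ∧ rem ≤ ((c :: p).length : Int) by
        simp only [List.length_cons]; push_cast; omega)]
      rw [if_pos ⟨by omega, by omega⟩]
      rw [hk]
      simp [List.take_succ_cons, List.drop_succ_cons]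
    · rw [if_neg (by simp only [List.length_cons]; push_cast; omega)]
      rw [if_neg (by omega)]
      simp
      omega

-- the line accumulator of pvSegF's fold only grows by appending
theorem pv_seg_shift (L : Int) : ∀ (ps : List (List Char)) (st : List String × List Char × Int),
    ps.foldl (pvSegF L) st
      = (st.1 ++ (ps.foldl (pvSegF L) ([], st.2)).1, (ps.foldl (pvSegF L) ([], st.2)).2) := by
  intro ps
  induction ps with
  | nil => intro st; simp
  | cons p ps ih =>
    intro st
    simp only [List.foldl_cons]
    rw [ih (pvSegF L st p), ih (pvSegF L ([], st.2) p)]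
    unfold pvSegF
    simp

-- B's wrap of a segment, on characters
def pvSegChars (L : Int) (seg : List Char) (cur : List Char) (rem : Int) :
    List String × List Char × Int :=
  pvSegB L (pvSplit1 '\t' seg) cur rem

theorem pv_seg_nil (L : Int) (cur : List Char) (rem : Int) :
    pvSegChars L [] cur rem = ([], cur, rem) := by
  unfold pvSegChars
  show pvSegB L [[]] cur rem = ([], cur, rem)
  show pvPieceB L cur rem [] = ([], cur, rem)
  unfold pvPieceB
  rw [if_neg (by simp)]
  simp

theorem pv_stepA_shift (L : Int) (lines : List String) (cur : List Char) (rem : Int) (c : Char) :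
    pvStepA L (lines, cur, rem) c
      = (lines ++ (pvStepA L ([], cur, rem) c).1, (pvStepA L ([], cur, rem) c).2) := by
  unfold pvStepA
  split_ifs <;> simp

-- one non-newline character moves through B's segment wrap exactly as through A's step
theorem pv_seg_step (L : Int) (c : Char) (hc : c ≠ '\n') (seg cur : List Char) (rem : Int) :
    pvSegChars L (c :: seg) cur rem
      = ((pvStepA L ([], cur, rem) c).1
           ++ (pvSegChars L seg (pvStepA L ([], cur, rem) c).2.1 (pvStepA L ([], cur, rem) c).2.2).1,
         (pvSegChars L seg (pvStepA L ([], cur, rem) c).2.1 (pvStepA L ([], cur, rem) c).2.2).2) := by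
  have hpn : pvPieceB L cur rem [] = ([], cur, rem) := by
    unfold pvPieceB; rw [if_neg (by simp)]; simp
  unfold pvSegChars
  by_cases ht : c = '\t'
  · subst ht
    have hstep : pvStepA L ([], cur, rem) '\t' = pvTabB L cur rem := by
      unfold pvStepA pvTabB
      rw [if_neg (by decide : ¬('\t' : Char) = '\n'), if_pos rfl]
      simp
    rw [hstep]
    rw [show pvSplit1 '\t' ('\t' :: seg) = [] :: pvSplit1 '\t' seg from by simp [pvSplit1]]
    cases hs : pvSplit1 '\t' seg with
    | nil => exact absurd hs (pvSplit1_ne_nil _ _)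
    | cons p0 ps =>
      show ps.foldl (pvSegF L) (pvSegF L (pvPieceB L cur rem []) p0)
        = ((pvTabB L cur rem).1 ++ (pvSegB L (p0 :: ps) (pvTabB L cur rem).2.1 (pvTabB L cur rem).2.2).1,
           (pvSegB L (p0 :: ps) (pvTabB L cur rem).2.1 (pvTabB L cur rem).2.2).2)
      rw [hpn]
      show ps.foldl (pvSegF L) (pvSegF L ([], cur, rem) p0)
        = ((pvTabB L cur rem).1 ++ (ps.foldl (pvSegF L) (pvPieceB L (pvTabB L cur rem).2.1 (pvTabB L cur rem).2.2 p0)).1,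
           (ps.foldl (pvSegF L) (pvPieceB L (pvTabB L cur rem).2.1 (pvTabB L cur rem).2.2 p0)).2)
      rw [pv_seg_shift L ps (pvSegF L ([], cur, rem) p0),
          pv_seg_shift L ps (pvPieceB L (pvTabB L cur rem).2.1 (pvTabB L cur rem).2.2 p0)]
      unfold pvSegF
      simp
  · have hstep : pvStepA L ([], cur, rem) c =
        if rem - 1 = 0 then ([String.ofList (cur ++ [c])], [], L) else ([], cur ++ [c], rem - 1) := by
      unfold pvStepA
      rw [if_neg hc, if_neg ht]
      simp
    rw [hstep]
    rw [show pvSplit1 '\t' (c :: seg) = (pvSplit1 '\t' seg).modifyHead (c :: ·) from by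
      simp [pvSplit1, ht]]
    cases hs : pvSplit1 '\t' seg with
    | nil => exact absurd hs (pvSplit1_ne_nil _ _)
    | cons p0 ps =>
      show ps.foldl (pvSegF L) (pvPieceB L cur rem (c :: p0)) = _
      rw [pv_piece_cons]
      by_cases hz : rem - 1 = 0
      · rw [if_pos hz, if_pos hz]
        show ps.foldl (pvSegF L)
            (String.ofList (cur ++ [c]) :: (pvPieceB L [] L p0).1, (pvPieceB L [] L p0).2)
          = ([String.ofList (cur ++ [c])] ++ (ps.foldl (pvSegF L) (pvPieceB L [] L p0)).1,
             (ps.foldl (pvSegF L) (pvPieceB L [] L p0)).2)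
        rw [pv_seg_shift L ps
            (String.ofList (cur ++ [c]) :: (pvPieceB L [] L p0).1, (pvPieceB L [] L p0).2),
          pv_seg_shift L ps (pvPieceB L [] L p0)]
        simp
      · rw [if_neg hz, if_neg hz]
        simp [pvSegB]

-- A's finisher
def pvFinish (st : List String × List Char × Int) : List String :=
  if st.2.1 ≠ [] then st.1 ++ [String.ofList st.2.1] else st.1

-- B's assembly over the segment list, with the first segment continuing state (cur, rem)
def pvBoutNew (L : Int) : List (List Char) → List Char → Int → List String
  | [], cur, _ => if cur ≠ [] then [String.ofList cur] else []
  | [seg], cur, rem =>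
      let st := pvSegChars L seg cur rem
      st.1 ++ (if st.2.1 ≠ [] then [String.ofList st.2.1] else [])
  | seg :: s :: ss, cur, rem =>
      let st := pvSegChars L seg cur rem
      st.1 ++ [String.ofList st.2.1] ++ pvBoutNew L (s :: ss) [] L

theorem pv_bout_step (L : Int) (c : Char) (hc : c ≠ '\n') (segs : List (List Char))
    (cur : List Char) (rem : Int) (h : segs ≠ []) :
    pvBoutNew L (segs.modifyHead (c :: ·)) cur rem
      = (pvStepA L ([], cur, rem) c).1
        ++ pvBoutNew L segs (pvStepA L ([], cur, rem) c).2.1 (pvStepA L ([], cur, rem) c).2.2 := by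
  match segs with
  | [] => exact absurd rfl h
  | [s] =>
    simp only [List.modifyHead, pvBoutNew]
    rw [pv_seg_step L c hc s cur rem]
    simp
  | s :: s' :: ss =>
    simp only [List.modifyHead, pvBoutNew]
    rw [pv_seg_step L c hc s cur rem]
    simp

theorem pv_main (L : Int) : ∀ (l : List Char) (lines : List String) (cur : List Char) (rem : Int),
    pvFinish (l.foldl (pvStepA L) (lines, cur, rem)) = lines ++ pvBoutNew L (pvSplit1 '\n' l) cur rem := by
  intro l
  induction l with
  | nil =>
    intro lines cur rem
    by_cases h : cur = [] <;>
      simp [pvFinish, pvSplit1, pvBoutNew, pv_seg_nil, h]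
  | cons c l ih =>
    intro lines cur rem
    simp only [List.foldl_cons]
    by_cases hc : c = '\n'
    · subst hc
      rw [show pvStepA L (lines, cur, rem) '\n' = (lines ++ [String.ofList cur], [], L) from rfl]
      rw [ih (lines ++ [String.ofList cur]) [] L]
      simp only [pvSplit1, if_pos]
      cases hs : pvSplit1 '\n' l with
      | nil => exact absurd hs (pvSplit1_ne_nil _ _)
      | cons s ss => simp [pvBoutNew, pv_seg_nil]
    · rw [pv_stepA_shift]
      rw [ih]
      simp only [pvSplit1, hc, if_false]
      rw [pv_bout_step L c hc (pvSplit1 '\n' l) cur rem (pvSplit1_ne_nil _ _)]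
      simp

-- B's dropLast/getLast assembly equals pvBoutNew on any nonempty segment list
theorem pv_bout_eq (L : Int) : ∀ (segs : List (List Char)), segs ≠ [] →
    pvBoutNew L segs [] L
      = (segs.dropLast.flatMap fun seg =>
          (pvWrapSeg seg L).1 ++ [String.ofList (pvWrapSeg seg L).2]) ++
        (if (pvWrapSeg (segs.getLast?.getD []) L).2 ≠ [] then
          (pvWrapSeg (segs.getLast?.getD []) L).1 ++ [String.ofList (pvWrapSeg (segs.getLast?.getD []) L).2]
         else (pvWrapSeg (segs.getLast?.getD []) L).1) := by
  have hw : ∀ seg : List Char,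
      pvWrapSeg seg L = ((pvSegChars L seg [] L).1, (pvSegChars L seg [] L).2.1) := by
    intro seg
    unfold pvWrapSeg pvSegChars
    rw [pv_splitOn_eq]
  intro segs
  induction segs with
  | nil => intro h; exact absurd rfl h
  | cons s rest ih =>
    intro _
    cases rest with
    | nil =>
      rw [show ([s] : List (List Char)).dropLast = [] from rfl]
      simp only [List.flatMap_nil, List.getLast?_singleton, Option.getD_some,
        List.nil_append, pvBoutNew, hw]
      split_ifs <;> simp
    | cons s' ss =>
      have hne : (s' :: ss : List (List Char)) ≠ [] := by simp
      rw [show (s :: s' :: ss : List (List Char)).dropLast = s :: (s' :: ss).dropLast from rfl]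
      rw [show (s :: s' :: ss : List (List Char)).getLast?.getD [] = (s' :: ss).getLast?.getD []
        from by simp [List.getLast?_cons_cons]]
      rw [List.flatMap_cons]
      rw [show pvBoutNew L (s :: s' :: ss) [] L
        = ((pvSegChars L s [] L).1 ++ [String.ofList (pvSegChars L s [] L).2.1]) ++ pvBoutNew L (s' :: ss) [] L
        from by simp [pvBoutNew]]
      rw [ih hne]
      simp [hw]

-- ===== VERDICT (by name: the statement is the Claim_ definition above) =====
theorem split_string_with_whitespace_spec : Claim_equal_split_string_with_whitespace := by
  intro text L _
  unfold Spec_split_string_with_whitespace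
  show split_string_with_whitespace text L = split_string_with_whitespace_alt text L
  simp only [split_string_with_whitespace, split_string_with_whitespace_alt]
  rw [pv_splitOn_eq]
  rw [show (if (text.toList.foldl (pvStepA L) ([], [], L)).2.1 ≠ [] then
      (text.toList.foldl (pvStepA L) ([], [], L)).1 ++
        [String.ofList (text.toList.foldl (pvStepA L) ([], [], L)).2.1]
    else (text.toList.foldl (pvStepA L) ([], [], L)).1)
    = pvFinish (text.toList.foldl (pvStepA L) ([], [], L)) from rfl]
  rw [pv_main L text.toList [] [] L]
  rw [pv_bout_eq L (pvSplit1 '\n' text.toList) (pvSplit1_ne_nil '\n' text.toList)]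
  rw [PySem.List.foldl_append_eq_flatMap]
  split_ifs <;> simp
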